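-- pv_equiv track=rewrite | github.com/evado88/eidsr-zebra-middleware-dev | eidsr-zebra-middleware.py | get_case_type
-- ===== SOURCE A (Python) =====
-- def get_case_type(eIDSR_dataElement, condition_mapping):
--     """
--     Map an eIDSR data element to case status.
--     Index: 0 Confirmed, 1 Death, 2 Sent to Lab, 3 Suspected
--     """
--     case_type = {0: 'Confirmed', 1: 'Death', 2: 'Sent to Lab', 3: 'Suspected'}
--     if not isinstance(eIDSR_dataElement, str):
--         return None
--     for values in condition_mapping.values():
--         if isinstance(values, list) and eIDSR_dataElement in values:
--             try:
--                 idx = values.index(eIDSR_dataElement)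
--                 return case_type.get(idx, "Unknown Case Type")
--             except ValueError:
--                 return "Unknown Case Type"
--     return None
-- ===== SOURCE B (Python) =====
-- def get_case_type(eIDSR_dataElement, condition_mapping):
--     """
--     Map an eIDSR data element to case status via a single prebuilt index:
--     every element of every list is inserted once (first occurrence wins),
--     then the answer is one dictionary lookup.
--     """
--     if not isinstance(eIDSR_dataElement, str):
--         return None
--     case_type = {0: 'Confirmed', 1: 'Death', 2: 'Sent to Lab', 3: 'Suspected'}
--     table = {}
--     for values in condition_mapping.values():
--         if isinstance(values, list):
--             for pos, element in enumerate(values):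
--                 if element not in table:
--                     table[element] = case_type.get(pos, 'Unknown Case Type')
--     return table.get(eIDSR_dataElement)
-- ===== Notes on version B (the rewrite author's own statement) =====
-- stated objective: alternative
-- what changed: B replaces A's per-row scan-and-early-return (membership test plus values.index inside the loop) with a single pass that builds an element->case-type index dict (insert-if-absent preserving first-list/first-position precedence) followed by one lookup.
import Mathlib
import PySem

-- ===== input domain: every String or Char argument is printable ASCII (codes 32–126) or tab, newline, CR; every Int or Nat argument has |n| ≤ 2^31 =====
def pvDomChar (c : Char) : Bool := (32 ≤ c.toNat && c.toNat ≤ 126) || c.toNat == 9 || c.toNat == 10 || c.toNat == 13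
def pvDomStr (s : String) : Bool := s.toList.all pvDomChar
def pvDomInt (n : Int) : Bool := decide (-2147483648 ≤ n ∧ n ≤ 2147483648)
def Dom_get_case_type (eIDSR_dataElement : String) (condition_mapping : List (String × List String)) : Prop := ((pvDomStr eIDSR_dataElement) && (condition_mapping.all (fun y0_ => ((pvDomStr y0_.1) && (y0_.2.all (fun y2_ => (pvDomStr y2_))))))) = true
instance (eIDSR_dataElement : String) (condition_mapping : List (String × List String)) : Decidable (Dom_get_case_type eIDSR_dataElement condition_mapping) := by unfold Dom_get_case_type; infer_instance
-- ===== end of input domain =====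

-- B builds one element→case-type index dict (insert-if-absent, so first list /
-- first position wins) and answers with a single lookup, instead of A's
-- per-row membership test + values.index + early return.

-- ===== PORT A =====
-- the shared literal dict {0:'Confirmed',1:'Death',2:'Sent to Lab',3:'Suspected'}
def pvCT : PySem.Dict Int String :=
  PySem.Dict.ofList [(0, "Confirmed"), (1, "Death"), (2, "Sent to Lab"), (3, "Suspected")]

-- A's 'for values in condition_mapping.values(): …' loop, step for step
def getCaseLoop (e : String) : List (String × List String) → Option String
  | [] => none
  | (_, vs) :: rest =>
    if e ∈ vs then
      match PySem.List.index? vs e with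
      | some idx => some (pvCT.getD (idx : Int) "Unknown Case Type")
      | none => some "Unknown Case Type"   -- Python's except ValueError branch
    else getCaseLoop e rest

def get_case_type (eIDSR_dataElement : String) (condition_mapping : List (String × List String)) : Option String :=
  getCaseLoop eIDSR_dataElement condition_mapping

-- ===== PORT B =====
-- 'if element not in table: table[element] = case_type.get(pos, …)'
def pvStep (d : PySem.Dict String String) (p : Int × String) : PySem.Dict String String :=
  if d.contains p.2 then d else d.insert p.2 (pvCT.getD p.1 "Unknown Case Type")

def get_case_type_alt (eIDSR_dataElement : String) (condition_mapping : List (String × List String)) : Option String :=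
  (condition_mapping.foldl
      (fun d kv => (PySem.List.enumerate kv.2).foldl pvStep d)
      PySem.Dict.empty).get? eIDSR_dataElement

-- ===== PRECONDITION & SPEC =====
def Spec_get_case_type (eIDSR_dataElement : String) (condition_mapping : List (String × List String)) (out : Option String) : Prop := out = get_case_type_alt eIDSR_dataElement condition_mapping
instance (eIDSR_dataElement : String) (condition_mapping : List (String × List String)) (out : Option String) : Decidable (Spec_get_case_type eIDSR_dataElement condition_mapping out) := by unfold Spec_get_case_type; infer_instance

-- ===== CLAIM (what is proved, stated in full; the proofs are below) =====
def Claim_equal_get_case_type : Prop := ∀ (eIDSR_dataElement : String) (condition_mapping : List (String × List String)), Dom_get_case_type eIDSR_dataElement condition_mapping → Spec_get_case_type eIDSR_dataElement condition_mapping (get_case_type eIDSR_dataElement condition_mapping)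

-- ===== LEMMAS AND PROOFS =====

-- the contribution of one row, seen from key e, when enumeration starts at s
def pvRowOpt (e : String) (s : Int) (vs : List String) : Option String :=
  (PySem.List.index? vs e).map (fun k => pvCT.getD (s + (k : Int)) "Unknown Case Type")

theorem pvRow_get (e : String) (vs : List String) (s : Int) (d : PySem.Dict String String) :
    ((PySem.List.enumerate vs s).foldl pvStep d).get? e = (d.get? e).or (pvRowOpt e s vs) := by
  induction vs generalizing s d with
  | nil =>
      simp [PySem.List.enumerate_nil, pvRowOpt, PySem.List.index?_eq_idxOf?]
  | cons x vs ih =>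
      rw [PySem.List.enumerate_cons, List.foldl_cons, ih]
      by_cases hx : x = e
      · subst hx
        by_cases hc : d.contains x
        · have hs : (d.get? x).isSome := by
            rw [← PySem.Dict.contains_eq_isSome_get?, hc]
          obtain ⟨v, hv⟩ := Option.isSome_iff_exists.mp hs
          simp [pvStep, hc, hv]
        · have hn : d.get? x = none := by
            rw [PySem.Dict.get?_eq_none_iff_contains]
            simpa using hc
          have h0 := PySem.List.index?_cons_self x vs
          simp only [PySem.List.index?_eq_idxOf?] at h0
          simp [pvStep, hc, hn, PySem.Dict.get?_insert_self, pvRowOpt, h0]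
      · have hstep : (pvStep d (s, x)).get? e = d.get? e := by
          unfold pvStep
          split
          · rfl
          · exact PySem.Dict.get?_insert_of_ne _ _ (fun h => hx h.symm)
        rw [hstep]
        have hidx : PySem.List.index? (x :: vs) e = (PySem.List.index? vs e).map (· + 1) :=
          PySem.List.index?_cons_of_ne vs hx
        unfold pvRowOpt
        rw [hidx]
        cases PySem.List.index? vs e with
        | none => simp
        | some k =>
            simp only [Option.map_some]
            have h2 : s + 1 + (k : Int) = s + ((k : Int) + 1) := by ring
            simp [h2]

theorem pvFold_get (e : String) (cm : List (String × List String)) (d : PySem.Dict String String) :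
    ((cm.foldl (fun d kv => (PySem.List.enumerate kv.2).foldl pvStep d) d).get? e)
      = (d.get? e).or (getCaseLoop e cm) := by
  induction cm generalizing d with
  | nil => simp [getCaseLoop]
  | cons kv rest ih =>
      rw [List.foldl_cons, ih, pvRow_get, Option.or_assoc]
      congr 1
      obtain ⟨k, vs⟩ := kv
      unfold getCaseLoop
      by_cases hm : e ∈ vs
      · obtain ⟨i, hi⟩ :=
          Option.isSome_iff_exists.mp ((PySem.List.index?_isSome_iff vs e).mpr hm)
        simp only [PySem.List.index?_eq_idxOf?] at hi
        simp [pvRowOpt, hi, hm]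
      · have hn := (PySem.List.index?_eq_none_iff vs e).mpr hm
        simp only [PySem.List.index?_eq_idxOf?] at hn
        simp [pvRowOpt, hn, hm]
        cases rest <;> rfl

-- ===== VERDICT (by name: the statement is the Claim_ definition above) =====
theorem get_case_type_spec : Claim_equal_get_case_type := by
  intro e cm _
  show get_case_type e cm = get_case_type_alt e cm
  rw [get_case_type_alt, pvFold_get]
  simp [get_case_type]
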